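-- pv_equiv track=rewrite | github.com/jeremyky/kuo-research | rig/md_hybrid_and_replay/instruction_generation.py | _dedupe_by_time_window
-- ===== SOURCE A (Python) =====
-- from typing import Optional, List, Dict, Tuple
--
-- def _dedupe_by_time_window(instructions: List[str],
--                            onsets: List[int],
--                            window: int) -> Tuple[List[str], List[int]]:
--     """
--     Keep only the first instruction that appears within 'window' steps
--     of an already accepted instruction with the same text.
--     """
--     kept_instr = []
--     kept_onsets = []
--     for instr, onset in zip(instructions, onsets):
--         conflict = False
--         for ki, ko in zip(kept_instr, kept_onsets):
--             if instr == ki and abs(onset - ko) <= window: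
--                 conflict = True
--                 break
--         if not conflict:
--             kept_instr.append(instr)
--             kept_onsets.append(onset)
--     return kept_instr, kept_onsets
-- ===== SOURCE B (Python) =====
-- def _dedupe_by_time_window(instructions, onsets, window):
--     # indexes kept onsets by text so each new item is checked only against
--     # kept items with the SAME text, not against every kept item
--     by_text = {}
--     kept_instr = []
--     kept_onsets = []
--     for instr, onset in zip(instructions, onsets):
--         prev = by_text.get(instr, [])
--         if not any(abs(onset - ko) <= window for ko in prev):
--             by_text[instr] = prev + [onset]
--             kept_instr.append(instr)
--             kept_onsets.append(onset)
--     return kept_instr, kept_onsets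
-- ===== Notes on version B (the rewrite author's own statement) =====
-- stated objective: faster
-- what changed: B builds a dict indexing kept onsets by instruction text, so the inner scan over all kept items is replaced by a check against only the same-text onsets.
import Mathlib
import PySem

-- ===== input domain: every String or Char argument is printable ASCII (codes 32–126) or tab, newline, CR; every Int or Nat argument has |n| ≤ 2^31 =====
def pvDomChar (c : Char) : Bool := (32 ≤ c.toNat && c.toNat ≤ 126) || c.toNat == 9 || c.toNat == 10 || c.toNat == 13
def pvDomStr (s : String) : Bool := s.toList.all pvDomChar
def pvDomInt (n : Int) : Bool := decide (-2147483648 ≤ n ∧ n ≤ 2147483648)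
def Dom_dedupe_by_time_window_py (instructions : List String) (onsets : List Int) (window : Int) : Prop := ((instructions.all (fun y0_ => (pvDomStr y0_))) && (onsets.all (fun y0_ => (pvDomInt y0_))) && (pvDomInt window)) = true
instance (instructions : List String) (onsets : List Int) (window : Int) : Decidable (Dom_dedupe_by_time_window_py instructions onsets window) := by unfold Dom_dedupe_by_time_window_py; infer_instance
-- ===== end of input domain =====

-- B replaces A's inner scan over all kept items by a dict from text to the kept onsets of that text (objective: faster on inputs with many distinct texts; same result proved on all inputs).

-- ===== PORT A =====
-- inner loop of A: scan the kept pairs, break at the first same-text onset within the window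
def pvConflictA (keptInstr : List String) (keptOnsets : List Int) (instr : String) (onset : Int) (window : Int) : Bool :=
  match keptInstr, keptOnsets with
  | ki :: kis, ko :: kos =>
    if instr = ki ∧ (((onset - ko).natAbs : Int) ≤ window) then true
    else pvConflictA kis kos instr onset window
  | _, _ => false

def dedupe_by_time_window_py (instructions : List String) (onsets : List Int) (window : Int) : List String × List Int :=
  (instructions.zip onsets).foldl
    (fun s p =>
      if pvConflictA s.1 s.2 p.1 p.2 window then s
      else (s.1 ++ [p.1], s.2 ++ [p.2]))
    ([], [])

-- ===== PORT B =====
def dedupe_by_time_window_py_alt (instructions : List String) (onsets : List Int) (window : Int) : List String × List Int :=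
  let r := (instructions.zip onsets).foldl
    (fun (s : PySem.Dict String (List Int) × List String × List Int) p =>
      let prev := s.1.getD p.1 []
      if !(prev.any (fun ko => decide (((p.2 - ko).natAbs : Int) ≤ window))) then
        (s.1.insert p.1 (prev ++ [p.2]), s.2.1 ++ [p.1], s.2.2 ++ [p.2])
      else s)
    (PySem.Dict.empty, [], [])
  (r.2.1, r.2.2)

-- ===== PRECONDITION & SPEC =====
def Spec_dedupe_by_time_window_py (instructions : List String) (onsets : List Int) (window : Int) (out : List String × List Int) : Prop := out = dedupe_by_time_window_py_alt instructions onsets window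
instance (instructions : List String) (onsets : List Int) (window : Int) (out : List String × List Int) : Decidable (Spec_dedupe_by_time_window_py instructions onsets window out) := by unfold Spec_dedupe_by_time_window_py; infer_instance

-- ===== CLAIM (what is proved, stated in full; the proofs are below) =====
def Claim_equal_dedupe_by_time_window_py : Prop := ∀ (instructions : List String) (onsets : List Int) (window : Int), Dom_dedupe_by_time_window_py instructions onsets window → Spec_dedupe_by_time_window_py instructions onsets window (dedupe_by_time_window_py instructions onsets window)

-- ===== LEMMAS AND PROOFS =====

-- A's inner scan equals "some same-text kept onset lies within the window"
theorem pvConflictA_eq_any (kis : List String) (kos : List Int) (t : String) (o w : Int) :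
    pvConflictA kis kos t o w =
      (((kis.zip kos).filter (fun q => decide (q.1 = t))).map (·.2)).any
        (fun ko => decide (((o - ko).natAbs : Int) ≤ w)) := by
  induction kis generalizing kos with
  | nil => simp [pvConflictA]
  | cons ki kis ih =>
    cases kos with
    | nil => simp [pvConflictA]
    | cons ko kos =>
      simp only [pvConflictA, List.zip_cons_cons, List.filter_cons]
      by_cases h1 : ki = t
      · subst h1
        simp [ih]
      · simp [h1, ih]
        intro e
        exact absurd e.symm h1

-- the loop invariant: B's dict maps each text to exactly the kept onsets of that text
theorem pvLoop_eq (w : Int) (l : List (String × Int)) :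
    ∀ (d : PySem.Dict String (List Int)) (ki : List String) (ko : List Int),
      ki.length = ko.length →
      (∀ t, d.getD t [] = ((ki.zip ko).filter (fun q => decide (q.1 = t))).map (·.2)) →
      (l.foldl
        (fun (s : PySem.Dict String (List Int) × List String × List Int) p =>
          let prev := s.1.getD p.1 []
          if !(prev.any (fun x => decide (((p.2 - x).natAbs : Int) ≤ w))) then
            (s.1.insert p.1 (prev ++ [p.2]), s.2.1 ++ [p.1], s.2.2 ++ [p.2])
          else s) (d, ki, ko)).2 =
      l.foldl
        (fun s p =>
          if pvConflictA s.1 s.2 p.1 p.2 w then s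
          else (s.1 ++ [p.1], s.2 ++ [p.2])) (ki, ko) := by
  induction l with
  | nil => intro d ki ko _ _; rfl
  | cons p l ih =>
    intro d ki ko hlen hinv
    have hc : pvConflictA ki ko p.1 p.2 w =
        (d.getD p.1 []).any (fun x => decide (((p.2 - x).natAbs : Int) ≤ w)) := by
      rw [pvConflictA_eq_any, hinv]
    simp only [List.foldl_cons, hc]
    cases hcond : (d.getD p.1 []).any (fun x => decide (((p.2 - x).natAbs : Int) ≤ w)) with
    | true =>
      simp only [Bool.not_true, Bool.false_eq_true, if_false, if_true]
      exact ih d ki ko hlen hinv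
    | false =>
      simp only [Bool.not_false, if_true, Bool.false_eq_true, if_false]
      refine ih _ _ _ (by simp [hlen]) ?_
      intro t
      rw [List.zip_append (by simpa using hlen), List.filter_append]
      rw [PySem.Dict.getD_insert]
      by_cases ht : t = p.1
      · subst ht
        rw [if_pos rfl, hinv]
        simp
      · rw [if_neg ht, hinv]
        simp
        exact fun e => ht e.symm

-- ===== VERDICT (by name: the statement is the Claim_ definition above) =====
theorem dedupe_by_time_window_py_spec : Claim_equal_dedupe_by_time_window_py := by
  intro instructions onsets window _
  unfold Spec_dedupe_by_time_window_py dedupe_by_time_window_py dedupe_by_time_window_py_alt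
  exact (pvLoop_eq window (instructions.zip onsets) PySem.Dict.empty [] [] rfl
    (by intro t; simp [PySem.Dict.getD_empty])).symm
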